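-- pv_equiv track=rewrite | github.com/sgnlplabeling/nlp_labeling | labeling_tool/deep-learning_based/DP/neuronlp2/io/conllx_stacked_data.py | _obtain_child_index_for_inside_out
-- ===== SOURCE A (Python) =====
-- def _obtain_child_index_for_inside_out(heads):
--     # heads mean head of that index
--     child_ids = [[] for _ in range(len(heads))]
--     for head in range(len(heads)):
--         # first find left children inside-out
--         for child in reversed(list(range(1, head))):
--             if heads[child] == head:
--                 child_ids[head].append(child)
--         # second find right children inside-out
--         for child in range(head + 1, len(heads)):
--             if heads[child] == head:
--                 child_ids[head].append(child)
--     return child_ids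
-- ===== SOURCE B (Python) =====
-- def _obtain_child_index_for_inside_out(heads):
--     n = len(heads)
--     left = [[] for _ in range(n)]
--     right = [[] for _ in range(n)]
--     for child in range(1, n):
--         h = heads[child]
--         if 0 <= h < n:
--             if child < h:
--                 left[h].append(child)
--             elif h < child:
--                 right[h].append(child)
--     return [left[h][::-1] + right[h] for h in range(n)]
-- ===== Notes on version B (the rewrite author's own statement) =====
-- stated objective: faster
-- what changed: Instead of scanning all positions for every head (nested loops), B makes one pass over the children, bucketing each child into a left/right list of its head, and builds each row as reversed(left)+right.
import Mathlib
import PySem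

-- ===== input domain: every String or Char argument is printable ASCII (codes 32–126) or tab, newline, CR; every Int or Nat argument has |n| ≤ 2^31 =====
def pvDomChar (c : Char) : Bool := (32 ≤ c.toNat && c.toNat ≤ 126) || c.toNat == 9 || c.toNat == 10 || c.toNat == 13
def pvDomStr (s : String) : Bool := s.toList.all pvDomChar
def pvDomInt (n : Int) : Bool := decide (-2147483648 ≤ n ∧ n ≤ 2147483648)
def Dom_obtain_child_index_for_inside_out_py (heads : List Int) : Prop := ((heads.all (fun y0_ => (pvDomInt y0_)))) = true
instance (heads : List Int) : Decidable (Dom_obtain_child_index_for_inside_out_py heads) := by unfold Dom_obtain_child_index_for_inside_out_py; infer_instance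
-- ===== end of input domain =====

-- B replaces A's per-head quadratic scans by one pass bucketing each child into its head's
-- left/right list; each row is then reversed(left)+right. Return values are proved identical.

-- ===== PORT A =====
-- literal port of _obtain_child_index_for_inside_out: child_ids = [[] for _ in range(len(heads))],
-- then for each head the two inner loops append to child_ids[head] (head ≥ 0, so .toNat is exact;
-- heads[child] has child ∈ [1, len), always in range, so pyGetD is exact there).
def obtain_child_index_for_inside_out_py (heads : List Int) : List (List Int) :=
  let n : Int := (heads.length : Int)
  let child_ids : List (List Int) := (PySem.List.pyRange 0 n 1).map (fun _ => ([] : List Int))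
  (PySem.List.pyRange 0 n 1).foldl (fun child_ids head =>
    let child_ids := ((PySem.List.pyRange 1 head 1).reverse).foldl
      (fun cs child =>
        if PySem.List.pyGetD heads child 0 = head then
          cs.set head.toNat (cs.getD head.toNat [] ++ [child])
        else cs) child_ids
    (PySem.List.pyRange (head + 1) n 1).foldl
      (fun cs child =>
        if PySem.List.pyGetD heads child 0 = head then
          cs.set head.toNat (cs.getD head.toNat [] ++ [child])
        else cs) child_ids) child_ids

-- ===== PORT B =====
-- literal port of Source B: one pass over child ∈ [1, len) bucketing into left/right lists of
-- heads[child] (index used only after checking 0 ≤ h < n, so .toNat and pyGetD are exact),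
-- then rows built as left[h][::-1] + right[h].
def obtain_child_index_for_inside_out_py_alt (heads : List Int) : List (List Int) :=
  let n : Int := (heads.length : Int)
  let empty : List (List Int) := (PySem.List.pyRange 0 n 1).map (fun _ => ([] : List Int))
  let lr := (PySem.List.pyRange 1 n 1).foldl
    (fun (lr : List (List Int) × List (List Int)) child =>
      let h := PySem.List.pyGetD heads child 0
      if 0 ≤ h ∧ h < n then
        if child < h then
          (lr.1.set h.toNat (lr.1.getD h.toNat [] ++ [child]), lr.2)
        else if h < child then
          (lr.1, lr.2.set h.toNat (lr.2.getD h.toNat [] ++ [child]))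
        else lr
      else lr) (empty, empty)
  (PySem.List.pyRange 0 n 1).map (fun h =>
    (lr.1.getD h.toNat []).reverse ++ lr.2.getD h.toNat [])

-- ===== PRECONDITION & SPEC =====
def Spec_obtain_child_index_for_inside_out_py (heads : List Int) (out : List (List Int)) : Prop := out = obtain_child_index_for_inside_out_py_alt heads
instance (heads : List Int) (out : List (List Int)) : Decidable (Spec_obtain_child_index_for_inside_out_py heads out) := by unfold Spec_obtain_child_index_for_inside_out_py; infer_instance

-- ===== CLAIM (what is proved, stated in full; the proofs are below) =====
def Claim_equal_obtain_child_index_for_inside_out_py : Prop := ∀ (heads : List Int), Dom_obtain_child_index_for_inside_out_py heads → Spec_obtain_child_index_for_inside_out_py heads (obtain_child_index_for_inside_out_py heads)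

-- ===== LEMMAS AND PROOFS =====

-- a fold that conditionally appends `c` to row `k c` of a table, characterised per index
lemma bucket_fold_getElem? (P : Int → Prop) [DecidablePred P] (k : Int → Nat)
    (l : List Int) (i : Nat) :
    ∀ t : List (List Int),
      (l.foldl (fun cs c => if P c then cs.set (k c) (cs.getD (k c) [] ++ [c]) else cs) t)[i]? =
        (t[i]?).map (· ++ l.filter (fun c => decide (P c ∧ k c = i))) := by
  induction l with
  | nil => intro t; cases htx : t[i]? <;> simp [htx]
  | cons c l ih =>
    intro t
    rw [List.foldl_cons, List.filter_cons, ih]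
    by_cases hP : P c
    · by_cases hk : k c = i
      · subst hk
        rw [if_pos hP]
        by_cases hlen : k c < t.length
        · simp [hlen, List.getD_eq_getElem?_getD, hP]
        · have h1 : t[k c]? = none := List.getElem?_eq_none (by omega)
          simp [hlen]
      · rw [if_pos hP]
        simp [hk]
    · simp [hP]

-- a fold whose every step appends `r h` to row `i`, characterised per index
lemma rows_fold_getElem? (S : List (List Int) → Int → List (List Int)) (r : Int → List Int)
    (i : Nat) (hS : ∀ t h, (S t h)[i]? = (t[i]?).map (· ++ r h)) (l : List Int) :
    ∀ t : List (List Int), (l.foldl S t)[i]? = (t[i]?).map (· ++ l.flatMap r) := by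
  induction l with
  | nil => intro t; cases htx : t[i]? <;> simp [htx]
  | cons h l ih =>
    intro t
    rw [List.foldl_cons, ih, hS]
    cases htx : t[i]? <;> simp [List.append_assoc]

-- a flatMap with at most one contributing element collapses to that element's row
lemma flatMap_eq_of_single {α β : Type} (l : List α) (r : α → List β) (a : α)
    (hnd : l.Nodup) (ha : a ∈ l) (h : ∀ x ∈ l, x ≠ a → r x = []) :
    l.flatMap r = r a := by
  induction l with
  | nil => simp at ha
  | cons b l ih =>
    rw [List.flatMap_cons]
    rcases List.mem_cons.mp ha with hb | hb
    · subst hb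
      have hnil : l.flatMap r = [] := List.flatMap_eq_nil_iff.mpr (fun x hx =>
        h x (List.mem_cons_of_mem _ hx) (by rintro rfl; exact (List.nodup_cons.mp hnd).1 hx))
      simp [hnil]
    · rw [h b (List.mem_cons_self ..) (by rintro rfl; exact (List.nodup_cons.mp hnd).1 hb),
        ih (List.nodup_cons.mp hnd).2 hb (fun x hx hx' => h x (List.mem_cons_of_mem _ hx) hx')]
      simp


-- specialisations of bucket_fold_getElem? to the three literal step lambdas of the ports
lemma bucketA (heads : List Int) (h : Int) (l : List Int) (i : Nat) :
    ∀ t : List (List Int),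
      (l.foldl (fun cs child =>
          if PySem.List.pyGetD heads child 0 = h then
            cs.set h.toNat (cs.getD h.toNat [] ++ [child])
          else cs) t)[i]? =
        (t[i]?).map (· ++ l.filter (fun c => decide (PySem.List.pyGetD heads c 0 = h ∧ h.toNat = i))) :=
  bucket_fold_getElem? (fun c => PySem.List.pyGetD heads c 0 = h) (fun _ => h.toNat) l i

lemma bucketL (heads : List Int) (l : List Int) (i : Nat) :
    ∀ t : List (List Int),
      (l.foldl (fun (t : List (List Int)) (c : Int) =>
      if 0 ≤ PySem.List.pyGetD heads c 0 ∧ PySem.List.pyGetD heads c 0 < (heads.length : Int) ∧ c < PySem.List.pyGetD heads c 0 then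
        t.set (PySem.List.pyGetD heads c 0).toNat (t.getD (PySem.List.pyGetD heads c 0).toNat [] ++ [c])
      else t) t)[i]? =
        (t[i]?).map (· ++ l.filter (fun c => decide ((0 ≤ PySem.List.pyGetD heads c 0 ∧ PySem.List.pyGetD heads c 0 < (heads.length : Int) ∧ c < PySem.List.pyGetD heads c 0) ∧ (PySem.List.pyGetD heads c 0).toNat = i))) :=
  bucket_fold_getElem? (fun c => 0 ≤ PySem.List.pyGetD heads c 0 ∧ PySem.List.pyGetD heads c 0 < (heads.length : Int) ∧ c < PySem.List.pyGetD heads c 0)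
    (fun c => (PySem.List.pyGetD heads c 0).toNat) l i

lemma bucketR (heads : List Int) (l : List Int) (i : Nat) :
    ∀ t : List (List Int),
      (l.foldl (fun (t : List (List Int)) (c : Int) =>
      if 0 ≤ PySem.List.pyGetD heads c 0 ∧ PySem.List.pyGetD heads c 0 < (heads.length : Int) ∧ PySem.List.pyGetD heads c 0 < c then
        t.set (PySem.List.pyGetD heads c 0).toNat (t.getD (PySem.List.pyGetD heads c 0).toNat [] ++ [c])
      else t) t)[i]? =
        (t[i]?).map (· ++ l.filter (fun c => decide ((0 ≤ PySem.List.pyGetD heads c 0 ∧ PySem.List.pyGetD heads c 0 < (heads.length : Int) ∧ PySem.List.pyGetD heads c 0 < c) ∧ (PySem.List.pyGetD heads c 0).toNat = i))) :=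
  bucket_fold_getElem? (fun c => 0 ≤ PySem.List.pyGetD heads c 0 ∧ PySem.List.pyGetD heads c 0 < (heads.length : Int) ∧ PySem.List.pyGetD heads c 0 < c)
    (fun c => (PySem.List.pyGetD heads c 0).toNat) l i

-- B's left bucket of row i holds exactly A's left candidates (read off A's left inner loop)
lemma filter_left_range (heads : List Int) (i : Nat) (hi : i < heads.length) :
    (PySem.List.pyRange 1 (heads.length : Int) 1).filter (fun c => decide ((0 ≤ PySem.List.pyGetD heads c 0 ∧ PySem.List.pyGetD heads c 0 < (heads.length : Int) ∧ c < PySem.List.pyGetD heads c 0) ∧ (PySem.List.pyGetD heads c 0).toNat = i)) =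
      (PySem.List.pyRange 1 (i : Int) 1).filter (fun c => decide (PySem.List.pyGetD heads c 0 = (i : Int))) := by
  by_cases h1 : 1 ≤ (i : Int)
  · rw [PySem.List.pyRange_one_append 1 (i : Int) (heads.length : Int) h1 (by omega), List.filter_append]
    have h2 : (PySem.List.pyRange (i : Int) (heads.length : Int) 1).filter (fun c => decide ((0 ≤ PySem.List.pyGetD heads c 0 ∧ PySem.List.pyGetD heads c 0 < (heads.length : Int) ∧ c < PySem.List.pyGetD heads c 0) ∧ (PySem.List.pyGetD heads c 0).toNat = i)) = [] := by
      rw [List.filter_eq_nil_iff]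
      intro c hc
      rw [PySem.List.mem_pyRange_one] at hc
      simp only [decide_eq_true_eq]
      omega
    rw [h2, List.append_nil]
    exact List.filter_congr (fun c hc => by
      rw [PySem.List.mem_pyRange_one] at hc
      rw [decide_eq_decide]
      omega)
  · have h0 : PySem.List.pyRange 1 (i : Int) 1 = [] := PySem.List.pyRange_one_eq_nil (by omega)
    rw [h0, List.filter_nil, List.filter_eq_nil_iff]
    intro c hc
    rw [PySem.List.mem_pyRange_one] at hc
    simp only [decide_eq_true_eq]
    omega

-- B's right bucket of row i holds exactly A's right candidates
lemma filter_right_range (heads : List Int) (i : Nat) (hi : i < heads.length) :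
    (PySem.List.pyRange 1 (heads.length : Int) 1).filter (fun c => decide ((0 ≤ PySem.List.pyGetD heads c 0 ∧ PySem.List.pyGetD heads c 0 < (heads.length : Int) ∧ PySem.List.pyGetD heads c 0 < c) ∧ (PySem.List.pyGetD heads c 0).toNat = i)) =
      (PySem.List.pyRange ((i : Int) + 1) (heads.length : Int) 1).filter (fun c => decide (PySem.List.pyGetD heads c 0 = (i : Int))) := by
  rw [PySem.List.pyRange_one_append 1 ((i : Int) + 1) (heads.length : Int) (by omega) (by omega), List.filter_append]
  have h2 : (PySem.List.pyRange 1 ((i : Int) + 1) 1).filter (fun c => decide ((0 ≤ PySem.List.pyGetD heads c 0 ∧ PySem.List.pyGetD heads c 0 < (heads.length : Int) ∧ PySem.List.pyGetD heads c 0 < c) ∧ (PySem.List.pyGetD heads c 0).toNat = i)) = [] := by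
    rw [List.filter_eq_nil_iff]
    intro c hc
    rw [PySem.List.mem_pyRange_one] at hc
    simp only [decide_eq_true_eq]
    omega
  rw [h2, List.nil_append]
  exact List.filter_congr (fun c hc => by
    rw [PySem.List.mem_pyRange_one] at hc
    rw [decide_eq_decide]
    omega)

-- ===== VERDICT (by name: the statement is the Claim_ definition above) =====
theorem obtain_child_index_for_inside_out_py_spec : Claim_equal_obtain_child_index_for_inside_out_py := by
  intro heads _
  unfold Spec_obtain_child_index_for_inside_out_py
  have hA : obtain_child_index_for_inside_out_py heads =
      (PySem.List.pyRange 0 (heads.length : Int) 1).foldl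
        (fun t head =>
          (PySem.List.pyRange (head + 1) (heads.length : Int) 1).foldl
            (fun cs child =>
          if PySem.List.pyGetD heads child 0 = head then
            cs.set head.toNat (cs.getD head.toNat [] ++ [child])
          else cs)
            (((PySem.List.pyRange 1 head 1).reverse).foldl
              (fun cs child =>
          if PySem.List.pyGetD heads child 0 = head then
            cs.set head.toNat (cs.getD head.toNat [] ++ [child])
          else cs) t))
        ((PySem.List.pyRange 0 (heads.length : Int) 1).map (fun _ => ([] : List Int))) := rfl
  have hB : obtain_child_index_for_inside_out_py_alt heads =
      (PySem.List.pyRange 0 (heads.length : Int) 1).map (fun h =>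
        ((((PySem.List.pyRange 1 (heads.length : Int) 1).foldl
      (fun (lr : List (List Int) × List (List Int)) child =>
        if 0 ≤ PySem.List.pyGetD heads child 0 ∧ PySem.List.pyGetD heads child 0 < (heads.length : Int) then
          if child < PySem.List.pyGetD heads child 0 then
            (lr.1.set (PySem.List.pyGetD heads child 0).toNat (lr.1.getD (PySem.List.pyGetD heads child 0).toNat [] ++ [child]), lr.2)
          else if PySem.List.pyGetD heads child 0 < child then
            (lr.1, lr.2.set (PySem.List.pyGetD heads child 0).toNat (lr.2.getD (PySem.List.pyGetD heads child 0).toNat [] ++ [child]))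
          else lr
        else lr)
      (((PySem.List.pyRange 0 (heads.length : Int) 1).map (fun _ => ([] : List Int))), ((PySem.List.pyRange 0 (heads.length : Int) 1).map (fun _ => ([] : List Int)))))).1.getD h.toNat []).reverse ++ (((PySem.List.pyRange 1 (heads.length : Int) 1).foldl
      (fun (lr : List (List Int) × List (List Int)) child =>
        if 0 ≤ PySem.List.pyGetD heads child 0 ∧ PySem.List.pyGetD heads child 0 < (heads.length : Int) then
          if child < PySem.List.pyGetD heads child 0 then
            (lr.1.set (PySem.List.pyGetD heads child 0).toNat (lr.1.getD (PySem.List.pyGetD heads child 0).toNat [] ++ [child]), lr.2)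
          else if PySem.List.pyGetD heads child 0 < child then
            (lr.1, lr.2.set (PySem.List.pyGetD heads child 0).toNat (lr.2.getD (PySem.List.pyGetD heads child 0).toNat [] ++ [child]))
          else lr
        else lr)
      (((PySem.List.pyRange 0 (heads.length : Int) 1).map (fun _ => ([] : List Int))), ((PySem.List.pyRange 0 (heads.length : Int) 1).map (fun _ => ([] : List Int)))))).2.getD h.toNat []) := rfl
  have hstep : (fun (lr : List (List Int) × List (List Int)) child =>
        if 0 ≤ PySem.List.pyGetD heads child 0 ∧ PySem.List.pyGetD heads child 0 < (heads.length : Int) then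
          if child < PySem.List.pyGetD heads child 0 then
            (lr.1.set (PySem.List.pyGetD heads child 0).toNat (lr.1.getD (PySem.List.pyGetD heads child 0).toNat [] ++ [child]), lr.2)
          else if PySem.List.pyGetD heads child 0 < child then
            (lr.1, lr.2.set (PySem.List.pyGetD heads child 0).toNat (lr.2.getD (PySem.List.pyGetD heads child 0).toNat [] ++ [child]))
          else lr
        else lr)
      = (fun lr child => ((fun (t : List (List Int)) (c : Int) =>
      if 0 ≤ PySem.List.pyGetD heads c 0 ∧ PySem.List.pyGetD heads c 0 < (heads.length : Int) ∧ c < PySem.List.pyGetD heads c 0 then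
        t.set (PySem.List.pyGetD heads c 0).toNat (t.getD (PySem.List.pyGetD heads c 0).toNat [] ++ [c])
      else t) lr.1 child, (fun (t : List (List Int)) (c : Int) =>
      if 0 ≤ PySem.List.pyGetD heads c 0 ∧ PySem.List.pyGetD heads c 0 < (heads.length : Int) ∧ PySem.List.pyGetD heads c 0 < c then
        t.set (PySem.List.pyGetD heads c 0).toNat (t.getD (PySem.List.pyGetD heads c 0).toNat [] ++ [c])
      else t) lr.2 child)) := by
    funext lr child
    dsimp only
    split_ifs <;> first | rfl | exact Prod.mk.eta.symm | (exfalso; omega)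
  have hlr : ((PySem.List.pyRange 1 (heads.length : Int) 1).foldl
      (fun (lr : List (List Int) × List (List Int)) child =>
        if 0 ≤ PySem.List.pyGetD heads child 0 ∧ PySem.List.pyGetD heads child 0 < (heads.length : Int) then
          if child < PySem.List.pyGetD heads child 0 then
            (lr.1.set (PySem.List.pyGetD heads child 0).toNat (lr.1.getD (PySem.List.pyGetD heads child 0).toNat [] ++ [child]), lr.2)
          else if PySem.List.pyGetD heads child 0 < child then
            (lr.1, lr.2.set (PySem.List.pyGetD heads child 0).toNat (lr.2.getD (PySem.List.pyGetD heads child 0).toNat [] ++ [child]))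
          else lr
        else lr)
      (((PySem.List.pyRange 0 (heads.length : Int) 1).map (fun _ => ([] : List Int))), ((PySem.List.pyRange 0 (heads.length : Int) 1).map (fun _ => ([] : List Int))))) = ((PySem.List.pyRange 1 (heads.length : Int) 1).foldl (fun (t : List (List Int)) (c : Int) =>
      if 0 ≤ PySem.List.pyGetD heads c 0 ∧ PySem.List.pyGetD heads c 0 < (heads.length : Int) ∧ c < PySem.List.pyGetD heads c 0 then
        t.set (PySem.List.pyGetD heads c 0).toNat (t.getD (PySem.List.pyGetD heads c 0).toNat [] ++ [c])
      else t) ((PySem.List.pyRange 0 (heads.length : Int) 1).map (fun _ => ([] : List Int))),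
      (PySem.List.pyRange 1 (heads.length : Int) 1).foldl (fun (t : List (List Int)) (c : Int) =>
      if 0 ≤ PySem.List.pyGetD heads c 0 ∧ PySem.List.pyGetD heads c 0 < (heads.length : Int) ∧ PySem.List.pyGetD heads c 0 < c then
        t.set (PySem.List.pyGetD heads c 0).toNat (t.getD (PySem.List.pyGetD heads c 0).toNat [] ++ [c])
      else t) ((PySem.List.pyRange 0 (heads.length : Int) 1).map (fun _ => ([] : List Int)))) := by
    rw [hstep]
    exact PySem.List.foldl_prod_mk (fun (t : List (List Int)) (c : Int) =>
      if 0 ≤ PySem.List.pyGetD heads c 0 ∧ PySem.List.pyGetD heads c 0 < (heads.length : Int) ∧ c < PySem.List.pyGetD heads c 0 then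
        t.set (PySem.List.pyGetD heads c 0).toNat (t.getD (PySem.List.pyGetD heads c 0).toNat [] ++ [c])
      else t) (fun (t : List (List Int)) (c : Int) =>
      if 0 ≤ PySem.List.pyGetD heads c 0 ∧ PySem.List.pyGetD heads c 0 < (heads.length : Int) ∧ PySem.List.pyGetD heads c 0 < c then
        t.set (PySem.List.pyGetD heads c 0).toNat (t.getD (PySem.List.pyGetD heads c 0).toNat [] ++ [c])
      else t) _ _ _
  rw [hA, hB, hlr]
  dsimp only
  apply List.ext_getElem?
  intro i
  have hS : ∀ (t : List (List Int)) (h : Int),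
      ((PySem.List.pyRange (h + 1) (heads.length : Int) 1).foldl
          (fun cs child =>
          if PySem.List.pyGetD heads child 0 = h then
            cs.set h.toNat (cs.getD h.toNat [] ++ [child])
          else cs)
          (((PySem.List.pyRange 1 h 1).reverse).foldl
            (fun cs child =>
          if PySem.List.pyGetD heads child 0 = h then
            cs.set h.toNat (cs.getD h.toNat [] ++ [child])
          else cs) t))[i]? =
        (t[i]?).map (fun x => x ++ (((PySem.List.pyRange 1 h 1).reverse).filter (fun c => decide (PySem.List.pyGetD heads c 0 = h ∧ h.toNat = i)) ++ (PySem.List.pyRange (h + 1) (heads.length : Int) 1).filter (fun c => decide (PySem.List.pyGetD heads c 0 = h ∧ h.toNat = i)))) := by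
    intro t h
    rw [bucketA heads h, bucketA heads h]
    cases htx : t[i]? <;> simp [List.append_assoc]
  rw [rows_fold_getElem? _ _ i hS]
  by_cases hi : i < heads.length
  · have hlt : i < (PySem.List.pyRange 0 (heads.length : Int) 1).length := by
      simp only [PySem.List.length_pyRange_one]
      omega
    have hempty : (((PySem.List.pyRange 0 (heads.length : Int) 1).map (fun _ => ([] : List Int))))[i]? = some [] := by
      rw [List.getElem?_map, List.getElem?_eq_getElem hlt]
      simp
    have hfL : ((PySem.List.pyRange 1 (heads.length : Int) 1).foldl (fun (t : List (List Int)) (c : Int) =>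
      if 0 ≤ PySem.List.pyGetD heads c 0 ∧ PySem.List.pyGetD heads c 0 < (heads.length : Int) ∧ c < PySem.List.pyGetD heads c 0 then
        t.set (PySem.List.pyGetD heads c 0).toNat (t.getD (PySem.List.pyGetD heads c 0).toNat [] ++ [c])
      else t) ((PySem.List.pyRange 0 (heads.length : Int) 1).map (fun _ => ([] : List Int)))).getD i [] =
        (PySem.List.pyRange 1 (heads.length : Int) 1).filter (fun c => decide ((0 ≤ PySem.List.pyGetD heads c 0 ∧ PySem.List.pyGetD heads c 0 < (heads.length : Int) ∧ c < PySem.List.pyGetD heads c 0) ∧ (PySem.List.pyGetD heads c 0).toNat = i)) := by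
      rw [List.getD_eq_getElem?_getD, bucketL heads _ i, hempty]
      simp
    have hfR : ((PySem.List.pyRange 1 (heads.length : Int) 1).foldl (fun (t : List (List Int)) (c : Int) =>
      if 0 ≤ PySem.List.pyGetD heads c 0 ∧ PySem.List.pyGetD heads c 0 < (heads.length : Int) ∧ PySem.List.pyGetD heads c 0 < c then
        t.set (PySem.List.pyGetD heads c 0).toNat (t.getD (PySem.List.pyGetD heads c 0).toNat [] ++ [c])
      else t) ((PySem.List.pyRange 0 (heads.length : Int) 1).map (fun _ => ([] : List Int)))).getD i [] =
        (PySem.List.pyRange 1 (heads.length : Int) 1).filter (fun c => decide ((0 ≤ PySem.List.pyGetD heads c 0 ∧ PySem.List.pyGetD heads c 0 < (heads.length : Int) ∧ PySem.List.pyGetD heads c 0 < c) ∧ (PySem.List.pyGetD heads c 0).toNat = i)) := by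
      rw [List.getD_eq_getElem?_getD, bucketR heads _ i, hempty]
      simp
    have hflat : (PySem.List.pyRange 0 (heads.length : Int) 1).flatMap
        (fun h => ((PySem.List.pyRange 1 h 1).reverse).filter (fun c => decide (PySem.List.pyGetD heads c 0 = h ∧ h.toNat = i)) ++ (PySem.List.pyRange (h + 1) (heads.length : Int) 1).filter (fun c => decide (PySem.List.pyGetD heads c 0 = h ∧ h.toNat = i))) =
        ((PySem.List.pyRange 1 ((i : Int)) 1).reverse).filter (fun c => decide (PySem.List.pyGetD heads c 0 = ((i : Int)) ∧ ((i : Int)).toNat = i)) ++ (PySem.List.pyRange (((i : Int)) + 1) (heads.length : Int) 1).filter (fun c => decide (PySem.List.pyGetD heads c 0 = ((i : Int)) ∧ ((i : Int)).toNat = i)) := by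
      refine flatMap_eq_of_single _ _ ((i : Int)) (PySem.List.nodup_pyRange_one _ _)
        (PySem.List.mem_pyRange_one.mpr ⟨by omega, by omega⟩) ?_
    
      intro x hx hne
      rw [PySem.List.mem_pyRange_one] at hx
      have e1 : ((PySem.List.pyRange 1 x 1).reverse).filter (fun c => decide (PySem.List.pyGetD heads c 0 = x ∧ x.toNat = i)) = [] := by
        rw [List.filter_eq_nil_iff]
        intro c hc
        simp only [decide_eq_true_eq]
        omega
      have e2 : (PySem.List.pyRange (x + 1) (heads.length : Int) 1).filter (fun c => decide (PySem.List.pyGetD heads c 0 = x ∧ x.toNat = i)) = [] := by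
        rw [List.filter_eq_nil_iff]
        intro c hc
        simp only [decide_eq_true_eq]
        omega
      rw [e1, e2]
      rfl
    rw [hempty, List.getElem?_map, List.getElem?_eq_getElem hlt, hflat]
    simp only [Option.map_some, List.nil_append, PySem.List.getElem_pyRange_one, zero_add,
      Int.toNat_natCast, and_true, hfL, hfR]
    rw [List.filter_reverse, filter_left_range heads i hi, filter_right_range heads i hi]
  · have hnone : ∀ (g : Int → List Int), ((PySem.List.pyRange 0 (heads.length : Int) 1).map g)[i]? = none := by
      intro g
      apply List.getElem?_eq_none
      simp only [List.length_map, PySem.List.length_pyRange_one]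
      omega
    rw [List.getElem?_map]
    have h1 : (PySem.List.pyRange 0 (heads.length : Int) 1)[i]? = none := by
      apply List.getElem?_eq_none
      simp only [PySem.List.length_pyRange_one]
      omega
    rw [h1, hnone]
    rfl
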